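-- pv_equiv track=rewrite | github.com/Asmolu/steam-download-monitor | steam_download_monitor.py | find_pause_resume_indices
-- ===== SOURCE A (Python) =====
-- def find_pause_resume_indices(text: str, appid: str) -> tuple[int | None, int | None]:
--     pause_markers = ("pause", "paused", "pausing")
--     resume_markers = ("resume", "resumed", "unpause", "unpaused")
--     context_markers = ("download", "content", "depot", "app")
--     pause_idx = None
--     resume_idx = None
--
--     for idx, line in enumerate(reversed(text.splitlines())):
--         low = line.lower()
--         if appid not in low and not any(marker in low for marker in context_markers):
--             continue
--         if resume_idx is None and any(marker in low for marker in resume_markers):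
--             resume_idx = idx
--         if pause_idx is None and any(marker in low for marker in pause_markers):
--             pause_idx = idx
--         if pause_idx is not None and resume_idx is not None:
--             break
--
--     return pause_idx, resume_idx
-- ===== SOURCE B (Python) =====
-- def find_pause_resume_indices(text: str, appid: str) -> tuple[int | None, int | None]:
--     pause_markers = ("pause", "paused", "pausing")
--     resume_markers = ("resume", "resumed", "unpause", "unpaused")
--     context_markers = ("download", "content", "depot", "app")
--     lows = [line.lower() for line in reversed(text.splitlines())]
--
--     def first_match(markers):
--         for idx, low in enumerate(lows):
--             if appid in low or any(m in low for m in context_markers):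
--                 if any(m in low for m in markers):
--                     return idx
--         return None
--
--     return first_match(pause_markers), first_match(resume_markers)
-- ===== Notes on version B (the rewrite author's own statement) =====
-- stated objective: simpler
-- what changed: Replaces the single fused scan with stateful pause/resume accumulators and a combined early-exit break by a lowercased-lines list built once and two independent stateless first-match scans, one per marker set.
import Mathlib
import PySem

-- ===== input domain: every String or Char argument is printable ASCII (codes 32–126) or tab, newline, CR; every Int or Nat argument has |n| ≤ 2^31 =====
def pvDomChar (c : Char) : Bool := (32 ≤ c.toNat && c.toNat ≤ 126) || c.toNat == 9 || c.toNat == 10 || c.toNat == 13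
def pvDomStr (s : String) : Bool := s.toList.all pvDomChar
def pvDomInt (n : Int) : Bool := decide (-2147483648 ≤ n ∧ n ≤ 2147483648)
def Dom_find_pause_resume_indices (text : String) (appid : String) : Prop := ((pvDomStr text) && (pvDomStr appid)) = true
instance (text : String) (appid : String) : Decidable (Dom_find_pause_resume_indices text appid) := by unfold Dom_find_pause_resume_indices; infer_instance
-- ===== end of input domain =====

-- B replaces A's single fused scan (two accumulators, combined early break) by a lowercased
-- reversed-lines list built once and two independent stateless first-match scans (objective: simpler).

-- ===== PORT A =====
-- A's loop over enumerate(reversed(text.splitlines())) with accumulators pause_idx/resume_idx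
-- and the early break once both are set.
def pvLoopA (appid : String) : List String → Int → Option Int → Option Int → Option Int × Option Int
  | [], _, p, r => (p, r)
  | line :: rest, idx, p, r =>
    let low := PySem.Str.lower line
    if !(PySem.Str.isIn appid low) &&
       !(["download", "content", "depot", "app"].any fun m => PySem.Str.isIn m low) then
      pvLoopA appid rest (idx + 1) p r
    else
      let r' := if r.isNone && (["resume", "resumed", "unpause", "unpaused"].any fun m => PySem.Str.isIn m low) then some idx else r
      let p' := if p.isNone && (["pause", "paused", "pausing"].any fun m => PySem.Str.isIn m low) then some idx else p
      if p'.isSome && r'.isSome then (p', r')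
      else pvLoopA appid rest (idx + 1) p' r'

def find_pause_resume_indices (text : String) (appid : String) : Option Int × Option Int :=
  pvLoopA appid (PySem.Str.splitlines text).reverse 0 none none

-- ===== PORT B =====
-- B's first_match over the precomputed lowercased reversed lines.
def pvFirstMatch (appid : String) (markers : List String) : List String → Int → Option Int
  | [], _ => none
  | low :: rest, idx =>
    if PySem.Str.isIn appid low ||
       (["download", "content", "depot", "app"].any fun m => PySem.Str.isIn m low) then
      if markers.any (fun m => PySem.Str.isIn m low) then some idx
      else pvFirstMatch appid markers rest (idx + 1)
    else pvFirstMatch appid markers rest (idx + 1)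

def find_pause_resume_indices_alt (text : String) (appid : String) : Option Int × Option Int :=
  let lows := ((PySem.Str.splitlines text).reverse).map PySem.Str.lower
  (pvFirstMatch appid ["pause", "paused", "pausing"] lows 0,
   pvFirstMatch appid ["resume", "resumed", "unpause", "unpaused"] lows 0)

-- ===== PRECONDITION & SPEC =====
def Spec_find_pause_resume_indices (text : String) (appid : String) (out : Option Int × Option Int) : Prop := out = find_pause_resume_indices_alt text appid
instance (text : String) (appid : String) (out : Option Int × Option Int) : Decidable (Spec_find_pause_resume_indices text appid out) := by unfold Spec_find_pause_resume_indices; infer_instance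

-- ===== CLAIM (what is proved, stated in full; the proofs are below) =====
def Claim_equal_find_pause_resume_indices : Prop := ∀ (text : String) (appid : String), Dom_find_pause_resume_indices text appid → Spec_find_pause_resume_indices text appid (find_pause_resume_indices text appid)

-- ===== LEMMAS AND PROOFS =====
-- Loop invariant: A's fused scan from any state (p, r) yields, componentwise, the accumulator
-- if already set, else B's first match over the remaining (lowercased) lines.
theorem pvLoopA_eq (appid : String) (lines : List String) :
    ∀ (idx : Int) (p r : Option Int),
      pvLoopA appid lines idx p r =
        (p.or (pvFirstMatch appid ["pause", "paused", "pausing"] (lines.map PySem.Str.lower) idx),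
         r.or (pvFirstMatch appid ["resume", "resumed", "unpause", "unpaused"] (lines.map PySem.Str.lower) idx)) := by
  induction lines with
  | nil => intro idx p r; simp [pvLoopA, pvFirstMatch]
  | cons line rest ih =>
    intro idx p r
    simp only [pvLoopA, pvFirstMatch, List.map_cons]
    generalize PySem.Str.isIn appid (PySem.Str.lower line) = a
    generalize (["download", "content", "depot", "app"].any fun m => PySem.Str.isIn m (PySem.Str.lower line)) = c
    generalize (["pause", "paused", "pausing"].any fun m => PySem.Str.isIn m (PySem.Str.lower line)) = pm
    generalize (["resume", "resumed", "unpause", "unpaused"].any fun m => PySem.Str.isIn m (PySem.Str.lower line)) = rm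
    rcases p with _ | pv <;> rcases r with _ | rv <;> cases a <;> cases c <;> cases pm <;> cases rm <;>
      simp [ih, Option.or]

-- ===== VERDICT (by name: the statement is the Claim_ definition above) =====
theorem find_pause_resume_indices_spec : Claim_equal_find_pause_resume_indices := by
  intro text appid _
  unfold Spec_find_pause_resume_indices find_pause_resume_indices find_pause_resume_indices_alt
  simp [pvLoopA_eq, Option.or]
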